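-- pv_equiv track=rewrite | github.com/ocamarli/analizadorIA | back/app/api/v1/generarDocServicios.py | clean_service_document_response
-- ===== SOURCE A (Python) =====
-- def clean_service_document_response(content):
--     """Limpieza específica para documentos de servicios"""
--     # Remover bloques de código markdown si están mal formateados
--     if '```' in content:
--         parts = content.split('```')
--         cleaned_parts = []
--         for i, part in enumerate(parts):
--             if i % 2 == 0:  # Texto fuera de bloques de código
--                 cleaned_parts.append(part)
--             else:  # Dentro de bloque de código
--                 cleaned_parts.append(f'```{part}```')
--         content = ''.join(cleaned_parts)
--
--     # Limpiar caracteres problemáticos pero preservar formato markdown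
--     lines = content.split('\n')
--     cleaned_lines = []
--
--     for line in lines:
--         # Preservar líneas de encabezados, listas, tablas, etc.
--         if (line.strip().startswith('#') or
--             line.strip().startswith('|') or
--             line.strip().startswith('-') or
--             line.strip().startswith('*') or
--             line.strip().startswith('>')):
--             cleaned_lines.append(line)
--         else:
--             # Para texto normal, hacer limpieza mínima
--             cleaned_lines.append(line)
--
--     return '\n'.join(cleaned_lines).strip()
-- ===== SOURCE B (Python) =====
-- def clean_service_document_response(content):
--     """Limpieza específica para documentos de servicios"""
--     # The split/rejoin in A reconstructs the input, except that an odd number of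
--     # ``` fences leaves the last block unclosed and A closes it; the line loop
--     # appends every line unchanged, so only the final strip remains.
--     if content.count('```') % 2 == 1:
--         content = content + '```'
--     return content.strip()
-- ===== Notes on version B (the rewrite author's own statement) =====
-- stated objective: simpler
-- what changed: Replaced the split/enumerate/rejoin pass and the no-op line-filter loop with a closed form: append one closing ``` when the fence count is odd, then strip.
import Mathlib
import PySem

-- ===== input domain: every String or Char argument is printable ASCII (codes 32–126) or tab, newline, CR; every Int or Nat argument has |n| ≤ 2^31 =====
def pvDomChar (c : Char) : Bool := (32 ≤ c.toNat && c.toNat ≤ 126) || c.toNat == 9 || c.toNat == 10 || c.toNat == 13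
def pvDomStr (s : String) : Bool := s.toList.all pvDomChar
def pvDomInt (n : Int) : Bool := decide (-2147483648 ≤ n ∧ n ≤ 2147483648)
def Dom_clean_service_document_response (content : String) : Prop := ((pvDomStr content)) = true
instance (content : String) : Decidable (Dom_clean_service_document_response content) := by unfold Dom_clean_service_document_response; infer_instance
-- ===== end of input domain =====

-- B replaces A's split/enumerate/rejoin pass and A's no-op line loop with a closed form:
-- append one closing ``` when the fence count is odd, then strip (objective: simpler).

-- ===== PORT A =====
def clean_service_document_response (content : String) : String :=
  let content1 :=
    if PySem.Str.isIn "```" content then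
      match PySem.Str.split? content "```" with
      | some parts =>
          let cleaned_parts := (PySem.List.enumerate parts 0).foldl
            (fun acc ip =>
              if PySem.Int.mod ip.1 2 == 0 then acc ++ [ip.2]
              else acc ++ ["```" ++ ip.2 ++ "```"]) []
          PySem.Str.join "" cleaned_parts
      | none => content      -- unreachable: the separator "```" is non-empty
    else content
  let lines := (PySem.Str.split? content1 "\n").getD []   -- sep "\n" ≠ "": always some
  let cleaned_lines := lines.foldl
    (fun acc line =>
      if PySem.Str.startswith (PySem.Str.strip line) "#" ||
         PySem.Str.startswith (PySem.Str.strip line) "|" ||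
         PySem.Str.startswith (PySem.Str.strip line) "-" ||
         PySem.Str.startswith (PySem.Str.strip line) "*" ||
         PySem.Str.startswith (PySem.Str.strip line) ">" then acc ++ [line]
      else acc ++ [line]) []
  PySem.Str.strip (PySem.Str.join "\n" cleaned_lines)

-- ===== PORT B =====
def clean_service_document_response_alt (content : String) : String :=
  let content2 := if PySem.Str.count content "```" % 2 == 1 then content ++ "```" else content
  PySem.Str.strip content2

-- ===== PRECONDITION & SPEC =====
def Spec_clean_service_document_response (content : String) (out : String) : Prop := out = clean_service_document_response_alt content
instance (content : String) (out : String) : Decidable (Spec_clean_service_document_response content out) := by unfold Spec_clean_service_document_response; infer_instance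

-- ===== CLAIM (what is proved, stated in full; the proofs are below) =====
def Claim_equal_clean_service_document_response : Prop := ∀ (content : String), Dom_clean_service_document_response content → Spec_clean_service_document_response content (clean_service_document_response content)

-- ===== LEMMAS AND PROOFS =====

-- A simple accumulator model of PySem.Chars.splitOn.go for a non-empty separator c :: sp
-- (pre is the piece built so far).
def pvSplit (c : Char) (sp : List Char) (pre l : List Char) : List (List Char) :=
  match l with
  | [] => [pre]
  | ch :: rest =>
    if (c :: sp).isPrefixOf (ch :: rest) then pre :: pvSplit c sp [] (rest.drop sp.length)
    else pvSplit c sp (pre ++ [ch]) rest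
termination_by l.length
decreasing_by all_goals (simp; try omega)

-- The number of non-overlapping occurrences, same recursion.
def pvCount (c : Char) (sp : List Char) (l : List Char) : Nat :=
  match l with
  | [] => 0
  | ch :: rest =>
    if (c :: sp).isPrefixOf (ch :: rest) then pvCount c sp (rest.drop sp.length) + 1
    else pvCount c sp rest
termination_by l.length
decreasing_by all_goals (simp; try omega)

theorem pvSplit_ne_nil (c : Char) (sp pre l : List Char) : pvSplit c sp pre l ≠ [] := by
  unfold pvSplit
  match l with
  | [] => simp
  | ch :: rest =>
    dsimp only
    split
    · simp
    · exact pvSplit_ne_nil c sp (pre ++ [ch]) rest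
termination_by l.length
decreasing_by simp

theorem splitOn_go_eq (c : Char) (sp : List Char) :
    ∀ (fuel : Nat) (l cur : List Char) (acc : List (List Char)), l.length ≤ fuel →
    PySem.Chars.splitOn.go (c :: sp) fuel l cur acc = acc.reverse ++ pvSplit c sp cur.reverse l := by
  intro fuel
  induction fuel with
  | zero =>
    intro l cur acc hl
    have : l = [] := by cases l <;> simp_all
    subst this
    simp [PySem.Chars.splitOn.go, pvSplit]
  | succ n ih =>
    intro l cur acc hl
    match l with
    | [] => simp [PySem.Chars.splitOn.go, pvSplit]
    | ch :: rest =>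
      rw [PySem.Chars.splitOn.go]
      rw [pvSplit]
      split
      · rename_i hpre
        rw [show (ch :: rest).drop (c :: sp).length = rest.drop sp.length by simp]
        rw [ih _ _ _ (by simp at hl ⊢; omega)]
        simp
      · rename_i hpre
        rw [ih _ _ _ (by simp at hl ⊢; omega)]
        simp

theorem splitOn_eq_pvSplit (c : Char) (sp : List Char) (s : List Char) :
    PySem.Chars.splitOn s (c :: sp) = pvSplit c sp [] s := by
  unfold PySem.Chars.splitOn
  rw [splitOn_go_eq c sp _ _ _ _ (by omega)]
  simp

theorem count_go_eq (c : Char) (sp : List Char) :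
    ∀ (fuel : Nat) (l : List Char) (acc : Nat), l.length ≤ fuel →
    PySem.Chars.count.go (c :: sp) fuel l acc = acc + pvCount c sp l := by
  intro fuel
  induction fuel with
  | zero =>
    intro l acc hl
    have : l = [] := by cases l <;> simp_all
    subst this
    simp [PySem.Chars.count.go, pvCount]
  | succ n ih =>
    intro l acc hl
    match l with
    | [] => simp [PySem.Chars.count.go, pvCount]
    | ch :: rest =>
      rw [PySem.Chars.count.go]
      rw [pvCount]
      split
      · rw [show (ch :: rest).drop (c :: sp).length = rest.drop sp.length by simp]
        rw [ih _ _ (by simp at hl ⊢; omega)]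
        omega
      · rw [ih _ _ (by simp at hl ⊢; omega)]

theorem count_eq_pvCount (c : Char) (sp : List Char) (s : List Char) :
    PySem.Chars.count s (c :: sp) = pvCount c sp s := by
  unfold PySem.Chars.count
  rw [if_neg (by simp)]
  rw [count_go_eq c sp _ _ _ (le_refl _)]
  omega

theorem join_cons_ne_nil (sep p : List Char) (M : List (List Char)) (h : M ≠ []) :
    PySem.Chars.join sep (p :: M) = p ++ sep ++ PySem.Chars.join sep M := by
  match M with
  | [] => exact absurd rfl h
  | q :: rest => rw [PySem.Chars.join_cons_cons]

theorem join_nil_cons (x : List Char) (xs : List (List Char)) :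
    PySem.Chars.join [] (x :: xs) = x ++ PySem.Chars.join [] xs := by
  match xs with
  | [] => simp [PySem.Chars.join_singleton, PySem.Chars.join_nil]
  | y :: ys => rw [PySem.Chars.join_cons_cons]; simp

theorem join_pvSplit (c : Char) (sp : List Char) (pre l : List Char) :
    PySem.Chars.join (c :: sp) (pvSplit c sp pre l) = pre ++ l := by
  unfold pvSplit
  match l with
  | [] => simp [PySem.Chars.join_singleton]
  | ch :: rest =>
    dsimp only
    split
    · rename_i hpre
      rw [join_cons_ne_nil _ _ _ (pvSplit_ne_nil c sp [] _)]
      rw [join_pvSplit c sp [] _]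
      obtain ⟨t, ht⟩ := List.isPrefixOf_iff_prefix.mp hpre
      rw [List.cons_append] at ht
      injection ht with hc hrest
      subst hc
      subst hrest
      simp
    · rw [join_pvSplit c sp (pre ++ [ch]) rest]
      simp
termination_by l.length
decreasing_by all_goals (simp; try omega)

theorem length_pvSplit (c : Char) (sp : List Char) (pre l : List Char) :
    (pvSplit c sp pre l).length = pvCount c sp l + 1 := by
  unfold pvSplit pvCount
  match l with
  | [] => simp
  | ch :: rest =>
    dsimp only
    split
    · rw [List.length_cons, length_pvSplit c sp [] _]
    · exact length_pvSplit c sp (pre ++ [ch]) rest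
termination_by l.length
decreasing_by all_goals (simp; try omega)

theorem pvCount_eq_zero (c : Char) (sp : List Char) (l : List Char)
    (h : ¬ (c :: sp) <:+: l) : pvCount c sp l = 0 := by
  unfold pvCount
  match l with
  | [] => simp
  | ch :: rest =>
    dsimp only
    rw [if_neg (fun hp => h (List.isPrefixOf_iff_prefix.mp hp).isInfix)]
    exact pvCount_eq_zero c sp rest (fun hi => h (hi.trans (List.suffix_cons ch rest).isInfix))
termination_by l.length
decreasing_by simp

theorem join_splitOn (c : Char) (sp : List Char) (s : List Char) :
    PySem.Chars.join (c :: sp) (PySem.Chars.splitOn s (c :: sp)) = s := by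
  rw [splitOn_eq_pvSplit, join_pvSplit]; rfl

-- the wrapping A applies to each enumerated part, at the character level
def pvWrap (ip : Int × List Char) : List Char :=
  if PySem.Int.mod ip.1 2 == 0 then ip.2 else '`' :: '`' :: '`' :: ip.2 ++ ['`', '`', '`']

theorem enumerate_map_ofList (ps : List (List Char)) (s : Int) :
    ((PySem.List.enumerate (ps.map String.ofList) s).map
        (fun ip => if PySem.Int.mod ip.1 2 == 0 then ip.2 else "```" ++ ip.2 ++ "```")).map String.toList
      = (PySem.List.enumerate ps s).map pvWrap := by
  induction ps generalizing s with
  | nil => simp [PySem.List.enumerate_nil]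
  | cons p rest ih =>
    simp only [List.map_cons, PySem.List.enumerate_cons, List.map]
    rw [ih]
    congr 1
    unfold pvWrap
    split <;> simp_all [String.toList_ofList]

-- the rebuild closed form: A's alternating wrap + empty-join equals the original join plus
-- a trailing ``` exactly when the number of parts is even
theorem rebuild (p : List Char) (rest : List (List Char)) (k : Nat) :
    PySem.Chars.join [] ((PySem.List.enumerate (p :: rest) (2 * (k : Int))).map pvWrap)
      = PySem.Chars.join ['`','`','`'] (p :: rest)
        ++ (if (p :: rest).length % 2 == 0 then ['`','`','`'] else []) := by
  match rest with
  | [] =>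
    simp only [PySem.List.enumerate_cons, PySem.List.enumerate_nil, List.map]
    rw [pvWrap, if_pos (by simp)]
    simp [PySem.Chars.join_singleton]
  | [q] =>
    simp only [PySem.List.enumerate_cons, PySem.List.enumerate_nil, List.map]
    rw [pvWrap, if_pos (by simp)]
    rw [pvWrap, if_neg (by simp)]
    simp [PySem.Chars.join_cons_cons, PySem.Chars.join_singleton]
  | q :: r :: rest' =>
    rw [PySem.List.enumerate_cons, PySem.List.enumerate_cons, List.map_cons, List.map_cons]
    rw [join_nil_cons, join_nil_cons]
    show pvWrap (2 * (k : Int), p) ++ (pvWrap (2 * (k : Int) + 1, q) ++ _) = _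
    rw [pvWrap, if_pos (by simp)]
    rw [pvWrap, if_neg (by simp)]
    have h2 : 2 * (k : Int) + 1 + 1 = 2 * ((k + 1 : Nat) : Int) := by push_cast; ring
    rw [h2, rebuild r rest' (k + 1)]
    rw [PySem.Chars.join_cons_cons, PySem.Chars.join_cons_cons]
    have hpar : (((p :: q :: r :: rest').length % 2 == 0)) = (((r :: rest').length % 2 == 0)) := by
      simp only [List.length_cons]
      have : (rest'.length + 1 + 1 + 1) % 2 = (rest'.length + 1) % 2 := by omega
      rw [this]
    rw [hpar]
    split <;> simp
termination_by rest.length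

-- the identical-branch line loop just copies its input
theorem line_loop_id (l : List String) (acc : List String) :
    l.foldl
      (fun acc line =>
        if PySem.Str.startswith (PySem.Str.strip line) "#" ||
           PySem.Str.startswith (PySem.Str.strip line) "|" ||
           PySem.Str.startswith (PySem.Str.strip line) "-" ||
           PySem.Str.startswith (PySem.Str.strip line) "*" ||
           PySem.Str.startswith (PySem.Str.strip line) ">" then acc ++ [line]
        else acc ++ [line]) acc = acc ++ l := by
  have hid : (fun (acc : List String) (line : String) =>
      if PySem.Str.startswith (PySem.Str.strip line) "#" ||
         PySem.Str.startswith (PySem.Str.strip line) "|" ||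
         PySem.Str.startswith (PySem.Str.strip line) "-" ||
         PySem.Str.startswith (PySem.Str.strip line) "*" ||
         PySem.Str.startswith (PySem.Str.strip line) ">" then acc ++ [line]
      else acc ++ [line]) = (fun acc line => acc ++ [line]) := by
    funext acc line; split <;> rfl
  rw [hid, PySem.List.foldl_append_singleton]

-- A's part-wrapping loop as a map
theorem part_loop_map (l : List (Int × String)) (acc : List String) :
    l.foldl
      (fun acc ip =>
        if PySem.Int.mod ip.1 2 == 0 then acc ++ [ip.2]
        else acc ++ ["```" ++ ip.2 ++ "```"]) acc
      = acc ++ l.map (fun ip => if PySem.Int.mod ip.1 2 == 0 then ip.2 else "```" ++ ip.2 ++ "```") := by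
  have hid : (fun (acc : List String) (ip : Int × String) =>
      if PySem.Int.mod ip.1 2 == 0 then acc ++ [ip.2] else acc ++ ["```" ++ ip.2 ++ "```"])
      = (fun acc ip => acc ++ [if PySem.Int.mod ip.1 2 == 0 then ip.2 else "```" ++ ip.2 ++ "```"]) := by
    funext acc ip; split <;> rfl
  rw [hid, PySem.List.foldl_append_singleton_eq_map]

theorem bt_toList : "```".toList = ['`', '`', '`'] := by decide

-- the "\n" split/rejoin of A's second phase is the identity at the character level
theorem newline_roundtrip (s : String) :
    (PySem.Str.join "\n" (((PySem.Str.split? s "\n").getD []))).toList = s.toList := by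
  have hnl : "\n".toList = ['\n'] := by decide
  have hsplit : PySem.Str.split? s "\n" = some ((PySem.Chars.splitOn s.toList ['\n']).map String.ofList) := by
    simp [PySem.Str.split?, PySem.Chars.split?, hnl]
  rw [hsplit]
  simp only [Option.getD_some, PySem.Str.join, String.toList_ofList, List.map_map]
  rw [hnl]
  have hmap : (PySem.Chars.splitOn s.toList ['\n']).map (String.toList ∘ String.ofList)
      = PySem.Chars.splitOn s.toList ['\n'] := by
    simp [Function.comp_def]
  rw [hmap]
  exact join_splitOn '\n' [] s.toList

theorem str_count_eq (content : String) :
    PySem.Str.count content "```" = pvCount '`' ['`','`'] content.toList := by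
  unfold PySem.Str.count
  rw [bt_toList]
  exact count_eq_pvCount '`' ['`','`'] _

theorem content1_toList (content : String) :
    (PySem.Str.join ""
        ((PySem.List.enumerate
            (((PySem.Str.split? content "```").getD []) ) 0).foldl
          (fun acc ip =>
            if PySem.Int.mod ip.1 2 == 0 then acc ++ [ip.2]
            else acc ++ ["```" ++ ip.2 ++ "```"]) [])).toList
      = content.toList ++ (if pvCount '`' ['`','`'] content.toList % 2 == 1 then ['`','`','`'] else []) := by
  have hsplit : PySem.Str.split? content "```"
      = some ((PySem.Chars.splitOn content.toList ['`','`','`']).map String.ofList) := by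
    simp [PySem.Str.split?, PySem.Chars.split?, bt_toList]
  rw [hsplit]
  simp only [Option.getD_some]
  rw [part_loop_map]
  simp only [List.nil_append, PySem.Str.join, String.toList_ofList]
  have hbtl : "".toList = ([] : List Char) := by decide
  rw [hbtl]
  have hps := splitOn_eq_pvSplit '`' ['`','`'] content.toList
  obtain ⟨p, rest, hcons⟩ : ∃ p rest, PySem.Chars.splitOn content.toList ['`','`','`'] = p :: rest := by
    rcases h : PySem.Chars.splitOn content.toList ['`','`','`'] with _ | ⟨p, rest⟩
    · rw [hps] at h; exact absurd h (pvSplit_ne_nil '`' ['`','`'] [] _)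
    · exact ⟨p, rest, rfl⟩
  rw [hcons]
  rw [enumerate_map_ofList (p :: rest) 0]
  rw [show (0 : Int) = 2 * ((0 : Nat) : Int) by norm_num]
  rw [rebuild p rest 0]
  have hjoin : PySem.Chars.join ['`','`','`'] (p :: rest) = content.toList := by
    rw [← hcons]
    exact join_splitOn '`' ['`','`'] content.toList
  have hlen : (p :: rest).length = pvCount '`' ['`','`'] content.toList + 1 := by
    rw [← hcons, hps]
    exact length_pvSplit '`' ['`','`'] [] content.toList
  have hpar : (((p :: rest).length % 2 == 0)) = ((pvCount '`' ['`','`'] content.toList % 2 == 1)) := by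
    rw [hlen]
    rcases Nat.mod_two_eq_zero_or_one (pvCount '`' ['`','`'] content.toList) with h | h <;>
      simp [Nat.add_mod, h]
  rw [hjoin, hpar]

theorem main_eq (content : String) :
    clean_service_document_response content = clean_service_document_response_alt content := by
  unfold clean_service_document_response clean_service_document_response_alt
  simp only []
  rw [line_loop_id]
  simp only [List.nil_append, PySem.Str.strip]
  apply congrArg String.ofList
  apply congrArg PySem.Chars.strip
  rw [newline_roundtrip]
  rw [str_count_eq]
  by_cases hIn : PySem.Str.isIn "```" content = true
  · rw [if_pos hIn]
    have h := content1_toList content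
    rcases hsome : PySem.Str.split? content "```" with _ | parts
    · exfalso
      have : PySem.Str.split? content "```"
          = some ((PySem.Chars.splitOn content.toList ['`','`','`']).map String.ofList) := by
        simp [PySem.Str.split?, PySem.Chars.split?, bt_toList]
      rw [hsome] at this; simp at this
    · rw [hsome] at h
      simp only [Option.getD_some] at h
      rw [h]
      split
      · simp [bt_toList]
      · simp
  · rw [if_neg hIn]
    have h0 : pvCount '`' ['`','`'] content.toList = 0 := by
      apply pvCount_eq_zero
      have hfalse : PySem.Chars.isIn ['`','`','`'] content.toList = false := by
        have : PySem.Str.isIn "```" content = false := by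
          cases hb : PySem.Str.isIn "```" content
          · rfl
          · exact absurd hb hIn
        unfold PySem.Str.isIn at this
        rw [bt_toList] at this
        exact this
      exact (PySem.Chars.isIn_eq_false_iff _ _).mp hfalse
    rw [h0]
    simp

theorem clean_service_document_response_spec : Claim_equal_clean_service_document_response := by
  intro content _
  unfold Spec_clean_service_document_response
  exact main_eq content
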